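-- pv_equiv track=rewrite | github.com/txk2048/aoc2022 | src/day3/main.py | part2
-- ===== SOURCE A (Python) =====
-- def make_lookup_table(bag):
--     """Makes lookup table for bag contents.
--
--     Returns a list of 52 elements, where the first 26 elements are the
--     lowercase letters and the last 26 elements are the uppercase letters."""
--     lookup = [None] * 52
--
--     for c in bag:
--         if c.isupper():
--             lookup[ord(c) - ord("A") + 26] = True
--         else:
--             lookup[ord(c) - ord("a")] = True
--
--     return lookup
--
-- def part2(elves):
--     def batched(iterable, n):
--         "Batch data into tuples of length n. The last batch may be shorter."
--         # batched('ABCDEFG', 3) --> ABC DEF G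
--
--         from itertools import islice
--
--         if n < 1:
--             raise ValueError("n must be at least one")
--         it = iter(iterable)
--         while batch := tuple(islice(it, n)):
--             yield batch
--
--     result = 0
--
--     for elf1, elf2, elf3 in batched(elves, 3):
--         bag1 = make_lookup_table(elf1)
--         bag2 = make_lookup_table(elf2)
--         bag3 = make_lookup_table(elf3)
--
--         for i, (v1, v2, v3) in enumerate(zip(bag1, bag2, bag3)):
--             if v1 and v2 and v3:
--                 result += i + 1
--                 break
--
--     return result
-- ===== SOURCE B (Python) =====
-- def part2(elves):
--     total = 0
--     rest = elves
--     while rest: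
--         elf1, elf2, elf3 = rest[:3]
--         rest = rest[3:]
--         counts = {}
--         for elf in (elf1, elf2, elf3):
--             for c in dict.fromkeys(elf):
--                 counts[c] = counts.get(c, 0) + 1
--         best = 0
--         for c, n in counts.items():
--             if n == 3:
--                 p = ord(c) - 96 if c.islower() else ord(c) - 38
--                 if best == 0 or p < best:
--                     best = p
--         total += best
--     return total
-- ===== Notes on version B (the rewrite author's own statement) =====
-- stated objective: alternative
-- what changed: B drops A's per-bag 52-slot boolean lookup tables, the batched() generator and the enumerate/zip positional scan: it slices the list three lines at a time, counts deduplicated characters of the group in one dict, and the common item is the minimum-priority character counted exactly 3 times.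
-- outside the precondition, e.g. on part2(['0', '0', '0']): A returns 4, B returns 10; on part2(['-', '-', '-']): A returns 1, B returns 7; on part2(['{', 'A', 'A']): A returns 27, B returns 0
import Mathlib
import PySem

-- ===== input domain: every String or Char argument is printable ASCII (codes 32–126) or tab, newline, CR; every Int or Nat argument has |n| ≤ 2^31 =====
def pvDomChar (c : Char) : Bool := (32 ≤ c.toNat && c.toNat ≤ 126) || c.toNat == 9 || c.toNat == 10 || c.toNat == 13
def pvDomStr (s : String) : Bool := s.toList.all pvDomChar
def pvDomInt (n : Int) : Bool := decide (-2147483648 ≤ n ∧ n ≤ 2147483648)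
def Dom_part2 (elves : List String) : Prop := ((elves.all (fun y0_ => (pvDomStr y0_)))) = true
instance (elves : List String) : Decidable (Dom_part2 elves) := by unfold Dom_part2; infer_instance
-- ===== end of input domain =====

-- B replaces A's per-bag 52-slot lookup tables and positional scan by an occurrence counter:
-- per group of three lines it counts deduplicated characters in one dict and picks the
-- minimum-priority char counted 3 times (objective: alternative; same asymptotic cost).

-- ===== PORT A =====
-- Python's lookup list holds None/True and is only ever read for truthiness;
-- it is ported as List Bool with false for None and true for True.
def lookupStep (lookup : List Bool) (c : Char) : List Bool :=
  if c.isUpper then PySem.List.pySetD lookup ((c.toNat : Int) - 65 + 26) true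
  else PySem.List.pySetD lookup ((c.toNat : Int) - 97) true

def makeLookupTable (bag : String) : List Bool :=
  bag.toList.foldl lookupStep (List.replicate 52 false)

-- the 'for i, (v1, v2, v3) in enumerate(zip(...))' scan with its break; i is the enumerate counter
def findCommonScan : List (Bool × Bool × Bool) → Int → Int
  | [], _ => 0
  | (v1, v2, v3) :: rest, i => if v1 && v2 && v3 then i + 1 else findCommonScan rest (i + 1)

-- batched(elves, 3) + the for-loop; a short final batch makes the Python raise ValueError
-- at tuple unpacking (excluded by Pre_), so only full batches contribute here
def part2Go : List String → Int → Int
  | e1 :: e2 :: e3 :: rest, result =>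
      part2Go rest (result +
        findCommonScan ((makeLookupTable e1).zip ((makeLookupTable e2).zip (makeLookupTable e3))) 0)
  | _, result => result

def part2 (elves : List String) : Int := part2Go elves 0

-- ===== PORT B =====
-- p = ord(c) - 96 if c.islower() else ord(c) - 38
def prioB (c : Char) : Int := if c.isLower then (c.toNat : Int) - 96 else (c.toNat : Int) - 38

-- for c in dict.fromkeys(elf): counts[c] = counts.get(c, 0) + 1
def addBag (counts : PySem.Dict Char Int) (elf : String) : PySem.Dict Char Int :=
  (PySem.List.dedup elf.toList).foldl (fun d c => d.insert c (d.getD c 0 + 1)) counts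

-- the 'for c, n in counts.items()' min-priority pick among chars counted 3 times
def bestOf (counts : PySem.Dict Char Int) : Int :=
  counts.items.foldl (fun best p =>
    if p.2 == 3 then
      if best == 0 || prioB p.1 < best then prioB p.1 else best
    else best) 0

-- the while-loop: unpack rest[:3] (ValueError on a short chunk, excluded by Pre_),
-- advance rest = rest[3:], add the group's best
def part2AltGo : List String → Int → Int
  | e1 :: e2 :: e3 :: rest, total =>
      part2AltGo rest (total + bestOf (addBag (addBag (addBag PySem.Dict.empty e1) e2) e3))
  | [], total => total
  | _, total => total

def part2_alt (elves : List String) : Int := part2AltGo elves 0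

-- ===== PRECONDITION & SPEC =====
-- Pre_ excludes lists whose length is not a multiple of 3 (A's tuple unpacking of the short
-- final batch raises ValueError) and lists containing a non-letter character, on which A's raw
-- 52-slot ord arithmetic either raises IndexError (ord < 45) or silently maps digits and
-- punctuation into accidental letter slots via Python's negative-index wraparound.
def Pre_part2 (elves : List String) : Prop :=
  elves.length % 3 = 0 ∧ (elves.all (fun s => s.toList.all Char.isAlpha)) = true
instance (elves : List String) : Decidable (Pre_part2 elves) := by unfold Pre_part2; infer_instance

def pvWitness_part2 : List String := ["ab", "bc", "cb"]

def Spec_part2 (elves : List String) (out : Int) : Prop := out = part2_alt elves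
instance (elves : List String) (out : Int) : Decidable (Spec_part2 elves out) := by unfold Spec_part2; infer_instance

-- ===== CLAIM (what is proved, stated in full; the proofs are below) =====
def Claim_equal_part2 : Prop := ∀ (elves : List String), Dom_part2 elves → Pre_part2 elves → Spec_part2 elves (part2 elves)

-- ===== LEMMAS AND PROOFS =====

-- the slot of A's lookup table that a letter occupies (lowercase 0-25, uppercase 26-51)
def slot (c : Char) : Nat := if c.isUpper then c.toNat - 39 else c.toNat - 97

theorem isUpper_iff (c : Char) : c.isUpper = true ↔ 65 ≤ c.toNat ∧ c.toNat ≤ 90 := by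
  simp only [Char.isUpper, ge_iff_le, decide_eq_true_eq]
  rw [UInt32.le_iff_toNat_le, UInt32.le_iff_toNat_le]
  rfl

theorem isLower_iff (c : Char) : c.isLower = true ↔ 97 ≤ c.toNat ∧ c.toNat ≤ 122 := by
  simp only [Char.isLower, ge_iff_le, Bool.and_eq_true, decide_eq_true_eq]
  rw [UInt32.le_iff_toNat_le, UInt32.le_iff_toNat_le]
  rfl

-- a letter is one of: uppercase with codes 65-90, lowercase with codes 97-122
theorem alpha_cases (c : Char) (hc : c.isAlpha = true) :
    (c.isUpper = true ∧ c.isLower = false ∧ 65 ≤ c.toNat ∧ c.toNat ≤ 90) ∨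
    (c.isUpper = false ∧ c.isLower = true ∧ 97 ≤ c.toNat ∧ c.toNat ≤ 122) := by
  by_cases hu : c.isUpper = true
  · left
    have hb := (isUpper_iff c).mp hu
    refine ⟨hu, ?_, hb.1, hb.2⟩
    cases hl : c.isLower with
    | false => rfl
    | true => have := (isLower_iff c).mp hl; omega
  · right
    have hu' : c.isUpper = false := by revert hu; cases c.isUpper <;> simp
    have hl : c.isLower = true := by
      rcases Bool.or_eq_true _ _ |>.mp hc with h | h
      · exact absurd h hu
      · exact h
    exact ⟨hu', hl, ((isLower_iff c).mp hl).1, ((isLower_iff c).mp hl).2⟩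

theorem slot_lt (c : Char) (hc : c.isAlpha = true) : slot c < 52 := by
  unfold slot
  rcases alpha_cases c hc with ⟨hu, _, hb1, hb2⟩ | ⟨hu, _, hb1, hb2⟩ <;> simp [hu] <;> omega

-- B's priority of a letter is its A-slot plus one
theorem prioB_eq (c : Char) (hc : c.isAlpha = true) : prioB c = (slot c : Int) + 1 := by
  unfold prioB slot
  rcases alpha_cases c hc with ⟨hu, hl, a1, a2⟩ | ⟨hu, hl, a1, a2⟩ <;> simp [hu, hl] <;> omega

-- two letters with the same slot are the same letter
theorem slot_inj (c d : Char) (hc : c.isAlpha = true) (hd : d.isAlpha = true)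
    (h : slot c = slot d) : c = d := by
  unfold slot at h
  apply Char.ext; apply UInt32.toNat_inj.mp
  show c.toNat = d.toNat
  rcases alpha_cases c hc with ⟨hu, _, a1, a2⟩ | ⟨hu, _, a1, a2⟩ <;>
    rcases alpha_cases d hd with ⟨hv, _, b1, b2⟩ | ⟨hv, _, b1, b2⟩ <;>
      rw [hu, hv] at h <;> simp only [if_true, if_false, Bool.false_eq_true] at h <;> omega

theorem lookupStep_eq (t : List Bool) (c : Char) (hc : c.isAlpha = true) :
    lookupStep t c = t.set (slot c) true := by
  unfold lookupStep slot
  rcases alpha_cases c hc with ⟨hu, _, a1, a2⟩ | ⟨hu, _, a1, a2⟩ <;> simp only [hu] <;>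
    simp only [if_true, if_false, Bool.false_eq_true]
  · have he : ((c.toNat : Int) - 65 + 26) = ((c.toNat - 39 : Nat) : Int) := by omega
    rw [he, PySem.List.pySetD_natCast]
  · have he : ((c.toNat : Int) - 97) = ((c.toNat - 97 : Nat) : Int) := by omega
    rw [he, PySem.List.pySetD_natCast]

theorem foldl_length (bag : List Char) (h : ∀ c ∈ bag, c.isAlpha = true) (t : List Bool) :
    (bag.foldl lookupStep t).length = t.length := by
  induction bag generalizing t with
  | nil => rfl
  | cons c cs ih =>
    simp only [List.foldl_cons]
    rw [ih (fun x hx => h x (List.mem_cons_of_mem _ hx)),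
        lookupStep_eq t c (h c (List.mem_cons_self)), List.length_set]

theorem foldl_getElem (bag : List Char) (h : ∀ c ∈ bag, c.isAlpha = true) (t : List Bool)
    (i : Nat) (hi : i < t.length) (hi' : i < (bag.foldl lookupStep t).length) :
    (bag.foldl lookupStep t)[i] = (t[i] || bag.any (fun c => slot c == i)) := by
  induction bag generalizing t with
  | nil => simp
  | cons c cs ih =>
    simp only [List.foldl_cons] at hi' ⊢
    simp only [lookupStep_eq t c (h c (List.mem_cons_self))] at hi' ⊢
    rw [ih (fun x hx => h x (List.mem_cons_of_mem _ hx)) _ (by simpa using hi) hi']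
    rw [List.getElem_set]
    by_cases hsc : slot c = i
    · simp [hsc]
    · have hb : (slot c == i) = false := by simpa using hsc
      simp [hb, hsc]

-- the enumerate-scan is the first index where all three entries are true
theorem scan_eq_findIdx (l : List (Bool × Bool × Bool)) (k : Int) :
    findCommonScan l k =
      match l.findIdx? (fun v => v.1 && v.2.1 && v.2.2) with
      | some j => k + j + 1
      | none => 0 := by
  induction l generalizing k with
  | nil => rfl
  | cons x rest ih =>
    obtain ⟨v1, v2, v3⟩ := x
    simp only [findCommonScan, List.findIdx?_cons]
    by_cases hp : (v1 && v2 && v3) = true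
    · rw [if_pos hp, if_pos hp]; simp
    · rw [if_neg hp, if_neg hp, ih (k + 1)]
      cases hf : List.findIdx? (fun v => v.1 && v.2.1 && v.2.2) rest with
      | none => simp
      | some j => simp; omega

-- the priorities B fires on: entries of the items list counted exactly 3
def fired (l : List (Char × Int)) : List Int :=
  (l.filter (fun p => p.2 == 3)).map (fun p => prioB p.1)

theorem fired_cons (p : Char × Int) (rest : List (Char × Int)) :
    fired (p :: rest) = if p.2 == 3 then prioB p.1 :: fired rest else fired rest := by
  simp only [fired, List.filter_cons]
  split <;> simp

-- B's best-loop with a positive accumulator is a running min over the fired priorities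
theorem best_foldl_min (l : List (Char × Int)) (acc : Int) (hacc : 1 ≤ acc)
    (hl : ∀ q ∈ fired l, 1 ≤ q) :
    l.foldl (fun best p =>
      if p.2 == 3 then
        if best == 0 || prioB p.1 < best then prioB p.1 else best
      else best) acc = (fired l).foldl min acc := by
  induction l generalizing acc with
  | nil => rfl
  | cons p rest ih =>
    rw [fired_cons] at hl ⊢
    by_cases h3 : (p.2 == 3) = true
    · rw [if_pos h3] at hl ⊢
      have hq : 1 ≤ prioB p.1 := hl _ List.mem_cons_self
      have hrest : ∀ q ∈ fired rest, 1 ≤ q := fun q hq' => hl q (List.mem_cons_of_mem _ hq')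
      simp only [List.foldl_cons, if_pos h3]
      have hne : (acc == 0) = false := by simp; omega
      simp only [hne, Bool.false_or]
      by_cases hlt : prioB p.1 < acc
      · rw [if_pos (by simpa using hlt), ih _ hq hrest]
        congr 1; omega
      · rw [if_neg (by simpa using hlt), ih _ hacc hrest]
        congr 1; omega
    · rw [if_neg h3] at hl ⊢
      simp only [List.foldl_cons, if_neg h3]
      exact ih _ hacc hl

-- B's best-loop from 0: 0 if nothing fires, else the minimum fired priority
theorem bestOf_min (counts : PySem.Dict Char Int)
    (hl : ∀ q ∈ fired counts.items, 1 ≤ q) :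
    bestOf counts =
      match fired counts.items with
      | [] => 0
      | q :: t => t.foldl min q := by
  unfold bestOf
  induction hli : counts.items with
  | nil => rfl
  | cons p rest ih =>
    rw [hli] at hl
    rw [fired_cons] at hl ⊢
    by_cases h3 : (p.2 == 3) = true
    · rw [if_pos h3] at hl ⊢
      have hq : 1 ≤ prioB p.1 := hl _ List.mem_cons_self
      have hrest : ∀ q ∈ fired rest, 1 ≤ q := fun q hq' => hl q (List.mem_cons_of_mem _ hq')
      simp only [List.foldl_cons, if_pos h3]
      have h0 : (((0 : Int) == 0) || prioB p.1 < (0 : Int)) = true := by simp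
      rw [if_pos h0, best_foldl_min rest _ hq hrest]
    · rw [if_neg h3] at hl ⊢
      simp only [List.foldl_cons, if_neg h3]
      -- restart the same argument on the tail
      clear ih hli
      induction rest with
      | nil => rfl
      | cons p' rest' ih' =>
        rw [fired_cons] at hl ⊢
        by_cases h3' : (p'.2 == 3) = true
        · rw [if_pos h3'] at hl ⊢
          have hq : 1 ≤ prioB p'.1 := hl _ List.mem_cons_self
          have hrest : ∀ q ∈ fired rest', 1 ≤ q := fun q hq' => hl q (List.mem_cons_of_mem _ hq')
          simp only [List.foldl_cons, if_pos h3']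
          have h0 : (((0 : Int) == 0) || prioB p'.1 < (0 : Int)) = true := by simp
          rw [if_pos h0, best_foldl_min rest' _ hq hrest]
        · rw [if_neg h3'] at hl ⊢
          simp only [List.foldl_cons, if_neg h3']
          exact ih' hl

-- dedup contributes each present char exactly once to the count
theorem count_dedup (l : List Char) (c : Char) :
    (PySem.List.dedup l).count c = if c ∈ l then 1 else 0 := by
  by_cases h : c ∈ l
  · rw [if_pos h]
    exact List.count_eq_one_of_mem (PySem.List.nodup_dedup l) ((PySem.List.mem_dedup l c).mpr h)
  · rw [if_neg h]
    exact List.count_eq_zero_of_not_mem (fun hm => h ((PySem.List.mem_dedup l c).mp hm))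

-- a char is counted 3 in the concatenated dedups iff it lies in all three lines
theorem count3_iff (e1 e2 e3 : List Char) (c : Char) :
    (PySem.List.dedup e1 ++ PySem.List.dedup e2 ++ PySem.List.dedup e3).count c = 3 ↔
      (c ∈ e1 ∧ c ∈ e2 ∧ c ∈ e3) := by
  rw [List.count_append, List.count_append, count_dedup, count_dedup, count_dedup]
  split_ifs <;> simp_all

-- the fired priorities of the group counter are exactly the priorities of the common chars
theorem mem_fired_counter (e1 e2 e3 : List Char) (q : Int) :
    q ∈ fired (PySem.Dict.counter
        (PySem.List.dedup e1 ++ PySem.List.dedup e2 ++ PySem.List.dedup e3)).items ↔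
      ∃ c, (c ∈ e1 ∧ c ∈ e2 ∧ c ∈ e3) ∧ prioB c = q := by
  unfold fired
  constructor
  · intro hq
    obtain ⟨p, hp, hpq⟩ := List.mem_map.mp hq
    obtain ⟨hpmem, h3⟩ := List.mem_filter.mp hp
    rw [PySem.Dict.items_counter] at hpmem
    obtain ⟨c, _, heq⟩ := List.mem_map.mp hpmem
    subst heq
    have hcnt : (PySem.List.dedup e1 ++ PySem.List.dedup e2 ++
        PySem.List.dedup e3).count c = 3 := by
      have h := beq_iff_eq.mp h3
      simp only at h
      exact_mod_cast h
    exact ⟨c, (count3_iff e1 e2 e3 c).mp hcnt, hpq⟩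
  · rintro ⟨c, hc, rfl⟩
    have hn := (count3_iff e1 e2 e3 c).mpr hc
    apply List.mem_map.mpr
    refine ⟨(c, ((PySem.List.dedup e1 ++ PySem.List.dedup e2 ++
        PySem.List.dedup e3).count c : Int)), List.mem_filter.mpr ⟨?_, ?_⟩, rfl⟩
    · rw [PySem.Dict.items_counter]
      exact List.mem_map.mpr ⟨c, (PySem.Set.mem_ofList _ c).mpr
        (List.mem_append.mpr (Or.inl (List.mem_append.mpr
          (Or.inl ((PySem.List.mem_dedup e1 c).mpr hc.1))))), rfl⟩
    · show (((PySem.List.dedup e1 ++ PySem.List.dedup e2 ++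
        PySem.List.dedup e3).count c : Int) == 3) = true
      rw [hn]; rfl

-- the three addBags of one group build exactly the counter of the concatenated dedups
theorem addBag_three (e1 e2 e3 : String) :
    addBag (addBag (addBag PySem.Dict.empty e1) e2) e3 =
      PySem.Dict.counter (PySem.List.dedup e1.toList ++ PySem.List.dedup e2.toList ++
        PySem.List.dedup e3.toList) := by
  unfold addBag
  rw [← PySem.Dict.foldl_insert_getD_add_one_eq_counter, List.foldl_append, List.foldl_append]

-- per-group equality: A's first common slot + 1 = B's minimal common priority
theorem group_eq (e1 e2 e3 : String)
    (h1 : ∀ c ∈ e1.toList, c.isAlpha = true)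
    (h2 : ∀ c ∈ e2.toList, c.isAlpha = true)
    (h3 : ∀ c ∈ e3.toList, c.isAlpha = true) :
    findCommonScan ((makeLookupTable e1).zip ((makeLookupTable e2).zip (makeLookupTable e3))) 0 =
      bestOf (addBag (addBag (addBag PySem.Dict.empty e1) e2) e3) := by
  have len1 : (makeLookupTable e1).length = 52 := by
    unfold makeLookupTable; rw [foldl_length _ h1]; simp
  have len2 : (makeLookupTable e2).length = 52 := by
    unfold makeLookupTable; rw [foldl_length _ h2]; simp
  have len3 : (makeLookupTable e3).length = 52 := by
    unfold makeLookupTable; rw [foldl_length _ h3]; simp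
  set z := (makeLookupTable e1).zip ((makeLookupTable e2).zip (makeLookupTable e3)) with hz
  have lenz : z.length = 52 := by
    rw [hz, List.length_zip, List.length_zip, len1, len2, len3]
    omega
  rw [addBag_three]
  set d := PySem.Dict.counter (PySem.List.dedup e1.toList ++ PySem.List.dedup e2.toList ++
    PySem.List.dedup e3.toList) with hd
  have hmem : ∀ q, q ∈ fired d.items ↔
      ∃ c, (c ∈ e1.toList ∧ c ∈ e2.toList ∧ c ∈ e3.toList) ∧ prioB c = q := by
    intro q; rw [hd]; exact mem_fired_counter e1.toList e2.toList e3.toList q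
  have hpos : ∀ q ∈ fired d.items, 1 ≤ q := by
    intro q hq
    obtain ⟨c, hc, rfl⟩ := (hmem q).mp hq
    rw [prioB_eq c (h1 c hc.1)]
    omega
  -- the scan predicate at slot j, in terms of membership
  have predz : ∀ (j : Nat) (hj : j < z.length),
      ((z[j]'hj).1 && (z[j]'hj).2.1 && (z[j]'hj).2.2) = true ↔
        (e1.toList.any (fun c => slot c == j) = true ∧
         e2.toList.any (fun c => slot c == j) = true ∧
         e3.toList.any (fun c => slot c == j) = true) := by
    intro j hj
    have hj52 : j < 52 := lenz ▸ hj
    have g1 : (makeLookupTable e1)[j]'(by omega) = e1.toList.any (fun c => slot c == j) := by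
      unfold makeLookupTable
      rw [foldl_getElem _ h1 _ j (by simp; omega)]
      simp only [List.getElem_replicate, Bool.false_or]
    have g2 : (makeLookupTable e2)[j]'(by omega) = e2.toList.any (fun c => slot c == j) := by
      unfold makeLookupTable
      rw [foldl_getElem _ h2 _ j (by simp; omega)]
      simp only [List.getElem_replicate, Bool.false_or]
    have g3 : (makeLookupTable e3)[j]'(by omega) = e3.toList.any (fun c => slot c == j) := by
      unfold makeLookupTable
      rw [foldl_getElem _ h3 _ j (by simp; omega)]
      simp only [List.getElem_replicate, Bool.false_or]
    have hz1 : z[j]'hj = ((makeLookupTable e1)[j]'(by omega),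
        ((makeLookupTable e2)[j]'(by omega), (makeLookupTable e3)[j]'(by omega))) := by
      show ((makeLookupTable e1).zip ((makeLookupTable e2).zip (makeLookupTable e3)))[j]'_ = _
      rw [List.getElem_zip, List.getElem_zip]
    rw [hz1]
    simp only [g1, g2, g3, Bool.and_eq_true]
    tauto
  -- a fired priority yields a true scan entry at its slot
  have hit : ∀ q ∈ fired d.items, ∃ (j : Nat) (hj : j < z.length),
      q = (j : Int) + 1 ∧ ((z[j]'hj).1 && (z[j]'hj).2.1 && (z[j]'hj).2.2) = true := by
    intro q hq
    obtain ⟨c, ⟨m1, m2, m3⟩, rfl⟩ := (hmem q).mp hq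
    have ha : c.isAlpha = true := h1 c m1
    have hj : slot c < z.length := by rw [lenz]; exact slot_lt c ha
    refine ⟨slot c, hj, prioB_eq c ha, ?_⟩
    rw [predz (slot c) hj]
    refine ⟨?_, ?_, ?_⟩ <;> rw [List.any_eq_true]
    · exact ⟨c, m1, by simp⟩
    · exact ⟨c, m2, by simp⟩
    · exact ⟨c, m3, by simp⟩
  rw [bestOf_min d hpos, scan_eq_findIdx]
  cases hf : z.findIdx? (fun v => v.1 && v.2.1 && v.2.2) with
  | none =>
    -- no slot is common to all three bags: nothing fires
    have hnil : fired d.items = [] := by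
      cases hfe : fired d.items with
      | nil => rfl
      | cons q t =>
        obtain ⟨j, hj, _, hpred⟩ := hit q (hfe ▸ List.mem_cons_self)
        have hnone := (List.findIdx?_eq_none_iff.mp hf) _ (List.getElem_mem hj)
        rw [hpred] at hnone
        exact absurd hnone (by simp)
    rw [hnil]
  | some j =>
    obtain ⟨hjlen, hpj, hleast⟩ := List.findIdx?_eq_some_iff_getElem.mp hf
    -- pred at j gives one char of each bag with slot j; slots are injective on letters,
    -- so it is one common char with priority j + 1
    obtain ⟨hm1, hm2, hm3⟩ := (predz j hjlen).mp hpj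
    obtain ⟨c1, hc1, hs1⟩ := List.any_eq_true.mp hm1
    obtain ⟨c2, hc2, hs2⟩ := List.any_eq_true.mp hm2
    obtain ⟨c3, hc3, hs3⟩ := List.any_eq_true.mp hm3
    have hs1' : slot c1 = j := by simpa using hs1
    have hs2' : slot c2 = j := by simpa using hs2
    have hs3' : slot c3 = j := by simpa using hs3
    have he21 : c2 = c1 := slot_inj c2 c1 (h2 c2 hc2) (h1 c1 hc1) (by omega)
    have he31 : c3 = c1 := slot_inj c3 c1 (h3 c3 hc3) (h1 c1 hc1) (by omega)
    have hjc : ((j : Int) + 1) ∈ fired d.items := by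
      rw [hmem]
      exact ⟨c1, ⟨hc1, he21 ▸ hc2, he31 ▸ hc3⟩, by rw [prioB_eq c1 (h1 c1 hc1), hs1']⟩
    cases hfe : fired d.items with
    | nil => rw [hfe] at hjc; exact absurd hjc (by simp)
    | cons q t =>
      have hminEq : PySem.List.min? (q :: t) (fun y => y) = some (t.foldl min q) :=
        PySem.List.min?_id_cons q t
      have hmmem : t.foldl min q ∈ fired d.items := hfe ▸ PySem.List.min?_mem hminEq
      -- the minimum is itself a fired priority: its slot cannot precede j
      obtain ⟨j', hj', hmj', hpred'⟩ := hit _ hmmem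
      have hge : ¬ j' < j := fun hlt => hleast j' hlt hpred'
      have hle : t.foldl min q ≤ (j : Int) + 1 :=
        PySem.List.min?_isMin hminEq _ (hfe ▸ hjc)
      show (0 : Int) + j + 1 = t.foldl min q
      omega

theorem go_eq : ∀ (l : List String), (∀ s ∈ l, ∀ c ∈ s.toList, c.isAlpha = true) →
    ∀ acc : Int, part2Go l acc = part2AltGo l acc
  | [], _, acc => rfl
  | [_], _, _ => rfl
  | [_, _], _, _ => rfl
  | e1 :: e2 :: e3 :: rest, h, acc => by
    simp only [part2Go, part2AltGo]
    rw [group_eq e1 e2 e3 (h e1 (by simp)) (h e2 (by simp)) (h e3 (by simp))]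
    exact go_eq rest (fun s hs => h s (by simp [hs])) _

-- ===== VERDICT (by name: the statement is the Claim_ definition above) =====
theorem part2_spec : Claim_equal_part2 := by
  intro elves _ hpre
  unfold Spec_part2 part2 part2_alt
  obtain ⟨-, hall⟩ := hpre
  apply go_eq
  intro s hs c hc
  have := List.all_eq_true.mp hall s hs
  exact List.all_eq_true.mp this c hc
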